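-- pv_equiv track=rewrite | github.com/Ziteng-Wang17780623062/Python-Work | Crisis/LLMs-Mental-Health-Crisis/src/classification.py | _compute_multiclass_confusion_matrix
-- ===== SOURCE A (Python) =====
-- from typing import Any, Dict, List, Optional
--
-- def _compute_multiclass_confusion_matrix(y_true: List[str], y_pred: List[str]) -> Dict[str, Dict[str, int]]:
--     """计算多分类混淆矩阵，返回字典格式 {真实标签: {预测标签: 数量}}"""
--     all_labels = sorted(set(y_true) | set(y_pred))
--     confusion_matrix = {label: {pred_label: 0 for pred_label in all_labels} for label in all_labels}
--
--     for true_label, pred_label in zip(y_true, y_pred):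
--         if true_label not in confusion_matrix:
--             confusion_matrix[true_label] = {pred_label: 0 for pred_label in all_labels}
--         if pred_label not in confusion_matrix[true_label]:
--             confusion_matrix[true_label][pred_label] = 0
--         confusion_matrix[true_label][pred_label] += 1
--
--     return confusion_matrix
-- ===== SOURCE B (Python) =====
-- from typing import Dict, List
--
--
-- def _compute_multiclass_confusion_matrix(y_true: List[str], y_pred: List[str]) -> Dict[str, Dict[str, int]]:
--     """Per-row brute force: filter each true label's predictions, each cell is a plain list.count."""
--     labels = sorted(set(y_true) | set(y_pred))
--     pairs = list(zip(y_true, y_pred))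
--     result = {}
--     for t in labels:
--         preds = [p for a, p in pairs if a == t]
--         result[t] = {p: preds.count(p) for p in labels}
--     return result
-- ===== Notes on version B (the rewrite author's own statement) =====
-- stated objective: simpler
-- what changed: Replaces A's single-pass incremental tally into a pre-zeroed mutable nested dict (with dead 'not in' guards) by a declarative per-row brute force: for each true label it filters that row's predictions out of the zipped pairs and computes every cell independently as preds.count(p), with no counting pass and no in-place increments.
import Mathlib
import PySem

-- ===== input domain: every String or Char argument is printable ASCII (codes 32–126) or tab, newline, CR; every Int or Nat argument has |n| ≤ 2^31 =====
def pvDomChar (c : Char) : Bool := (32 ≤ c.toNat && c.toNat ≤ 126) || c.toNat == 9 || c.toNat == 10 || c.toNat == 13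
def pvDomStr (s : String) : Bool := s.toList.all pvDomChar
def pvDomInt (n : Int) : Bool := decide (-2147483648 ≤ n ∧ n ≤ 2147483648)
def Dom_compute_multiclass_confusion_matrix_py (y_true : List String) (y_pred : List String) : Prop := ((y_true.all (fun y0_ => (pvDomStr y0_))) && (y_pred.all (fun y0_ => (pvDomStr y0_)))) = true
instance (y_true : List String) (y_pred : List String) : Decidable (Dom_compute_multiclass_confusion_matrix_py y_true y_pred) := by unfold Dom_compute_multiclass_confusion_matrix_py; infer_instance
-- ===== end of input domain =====

-- B replaces A's single-pass incremental tally into a pre-zeroed mutable nested dict by a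
-- declarative per-cell brute force (each cell = pairs.count((t,p))); simpler, not faster; return values proved equal.


-- ===== PORT A =====
-- sorted(set(y_true) | set(y_pred)) — the identical expression occurs in both Pythons
def pvAllLabels (y_true : List String) (y_pred : List String) : List String :=
  PySem.List.sorted (PySem.Set.union (PySem.Set.ofList y_true) y_pred) (fun x => x) false

-- {pred_label: 0 for pred_label in all_labels}
def pvZeroRow (labels : List String) : PySem.Dict String Int :=
  labels.foldl (fun r p => r.insert p 0) PySem.Dict.empty

-- one iteration of A's for-loop; Python's cm[t] subscripts and cm[t][p] += 1 are rendered with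
-- getD/modify defaults that are never hit (the preceding guards guarantee the keys are present)
def pvStepA (labels : List String) (cm : PySem.Dict String (PySem.Dict String Int))
    (pr : String × String) : PySem.Dict String (PySem.Dict String Int) :=
  let cm1 := if cm.contains pr.1 then cm else cm.insert pr.1 (pvZeroRow labels)
  let cm2 := if (cm1.getD pr.1 PySem.Dict.empty).contains pr.2 then cm1
             else cm1.modify pr.1 PySem.Dict.empty (fun row => row.insert pr.2 0)
  cm2.modify pr.1 PySem.Dict.empty (fun row => row.modify pr.2 0 (· + 1))

def compute_multiclass_confusion_matrix_py (y_true : List String) (y_pred : List String) :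
    List (String × List (String × Int)) :=
  let all_labels := pvAllLabels y_true y_pred
  let cm0 : PySem.Dict String (PySem.Dict String Int) :=
    all_labels.foldl (fun d label => d.insert label (pvZeroRow all_labels)) PySem.Dict.empty
  let cmF := (y_true.zip y_pred).foldl (pvStepA all_labels) cm0
  cmF.items.map (fun kv => (kv.1, kv.2.items))

-- ===== PORT B =====
-- per-row brute force: preds = [p for a, p in pairs if a == t];  {p: preds.count(p) for p in labels}
-- — no counting pass, each cell is an independent preds.count; the dict comprehension is an insert-fold
def pvRowPreds (pairs : List (String × String)) (t : String) : List String :=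
  (pairs.filter (fun pr => pr.1 == t)).map Prod.snd

def compute_multiclass_confusion_matrix_py_alt (y_true : List String) (y_pred : List String) :
    List (String × List (String × Int)) :=
  let labels := pvAllLabels y_true y_pred
  let pairs := y_true.zip y_pred
  let result : PySem.Dict String (PySem.Dict String Int) :=
    labels.foldl (fun out t =>
      let preds := pvRowPreds pairs t
      out.insert t (labels.foldl
        (fun r p => r.insert p (PySem.List.count preds p : Int)) PySem.Dict.empty))
      PySem.Dict.empty
  result.items.map (fun kv => (kv.1, kv.2.items))

-- ===== PRECONDITION & SPEC =====
def Spec_compute_multiclass_confusion_matrix_py (y_true : List String) (y_pred : List String) (out : List (String × List (String × Int))) : Prop := out = compute_multiclass_confusion_matrix_py_alt y_true y_pred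
instance (y_true : List String) (y_pred : List String) (out : List (String × List (String × Int))) : Decidable (Spec_compute_multiclass_confusion_matrix_py y_true y_pred out) := by unfold Spec_compute_multiclass_confusion_matrix_py; infer_instance

-- ===== CLAIM (what is proved, stated in full; the proofs are below) =====
def Claim_equal_compute_multiclass_confusion_matrix_py : Prop := ∀ (y_true : List String) (y_pred : List String), Dom_compute_multiclass_confusion_matrix_py y_true y_pred → Spec_compute_multiclass_confusion_matrix_py y_true y_pred (compute_multiclass_confusion_matrix_py y_true y_pred)

-- ===== LEMMAS AND PROOFS =====

theorem pvAllLabels_nodup (y_true y_pred : List String) : (pvAllLabels y_true y_pred).Nodup := by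
  unfold pvAllLabels
  exact (PySem.List.sorted_perm _ _ _).nodup_iff.mpr
    (by simp only [PySem.Set.nodup_ofList, PySem.Set.nodup_union])

theorem mem_pvAllLabels (y_true y_pred : List String) (x : String) :
    x ∈ pvAllLabels y_true y_pred ↔ (x ∈ y_true ∨ x ∈ y_pred) := by
  unfold pvAllLabels
  rw [(PySem.List.sorted_perm _ _ _).mem_iff]
  simp only [PySem.Set.mem_union, PySem.Set.mem_ofList]

theorem pvZeroRow_items (L : List String) (hL : L.Nodup) :
    (pvZeroRow L).items = L.map (fun p => (p, (0 : Int))) := by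
  unfold pvZeroRow
  rw [PySem.Dict.items_foldl_insert_fresh (k := fun p => p) (v := fun _ => (0 : Int))
    L PySem.Dict.empty (fun a _ => PySem.Dict.contains_empty a) (by simpa using hL)]
  rfl

theorem pvZeroRow_keys (L : List String) (hL : L.Nodup) : (pvZeroRow L).keys = L := by
  simp [PySem.Dict.keys, pvZeroRow_items L hL, Function.comp_def]

theorem pvZeroRow_getD (L : List String) (hL : L.Nodup) (p : String) :
    (pvZeroRow L).getD p 0 = 0 := by
  by_cases hp : p ∈ L
  · have hm : (p, (0 : Int)) ∈ (pvZeroRow L).items := by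
      rw [pvZeroRow_items L hL]; exact List.mem_map.mpr ⟨p, hp, rfl⟩
    have hn : (pvZeroRow L).keys.Nodup := by rw [pvZeroRow_keys L hL]; exact hL
    exact PySem.Dict.getD_of_mem_items _ hm hn 0
  · have hcon : (pvZeroRow L).contains p = false := by
      rw [Bool.eq_false_iff]
      intro hct
      rw [PySem.Dict.contains_iff_mem_keys, pvZeroRow_keys L hL] at hct
      exact hp hct
    exact PySem.Dict.getD_of_not_contains _ 0 hcon

-- A's loop body, once the (always-present) keys are known, is one nested modify
theorem pvStepA_eq (L : List String) (cm : PySem.Dict String (PySem.Dict String Int))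
    (pr : String × String) (h1 : cm.contains pr.1 = true)
    (h2 : (cm.getD pr.1 PySem.Dict.empty).contains pr.2 = true) :
    pvStepA L cm pr = cm.modify pr.1 PySem.Dict.empty (fun row => row.modify pr.2 0 (· + 1)) := by
  unfold pvStepA
  simp [h1, h2]

theorem pvLoopA (L : List String) (_hL : L.Nodup) :
    ∀ (Z : List (String × String)) (cm : PySem.Dict String (PySem.Dict String Int)),
    cm.keys = L →
    (∀ k, k ∈ L → (cm.getD k PySem.Dict.empty).keys = L) →
    (∀ pr, pr ∈ Z → pr.1 ∈ L ∧ pr.2 ∈ L) →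
    (Z.foldl (pvStepA L) cm).keys = L ∧
    (∀ k, k ∈ L → ((Z.foldl (pvStepA L) cm).getD k PySem.Dict.empty).keys = L) ∧
    (∀ t p, ((Z.foldl (pvStepA L) cm).getD t PySem.Dict.empty).getD p 0
        = (cm.getD t PySem.Dict.empty).getD p 0 + Z.count (t, p)) := by
  intro Z
  induction Z with
  | nil => intro cm h1 h2 _; exact ⟨h1, h2, fun t p => by simp⟩
  | cons ab Z ih =>
    intro cm hkeys hrows hmem
    have ha : ab.1 ∈ L := (hmem ab (List.mem_cons_self)).1
    have hb : ab.2 ∈ L := (hmem ab (List.mem_cons_self)).2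
    have hc1 : cm.contains ab.1 = true := by
      rw [PySem.Dict.contains_iff_mem_keys, hkeys]; exact ha
    have hc2 : (cm.getD ab.1 PySem.Dict.empty).contains ab.2 = true := by
      rw [PySem.Dict.contains_iff_mem_keys, hrows ab.1 ha]; exact hb
    have hstep := pvStepA_eq L cm ab hc1 hc2
    set cm' := cm.modify ab.1 PySem.Dict.empty (fun row => row.modify ab.2 0 (· + 1)) with hcm'
    have hkeys' : cm'.keys = L := by
      rw [hcm', PySem.Dict.keys_modify, PySem.Dict.keys_insert_of_contains _ _ hc1, hkeys]
    have hgetD' : ∀ k, cm'.getD k PySem.Dict.empty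
        = if k = ab.1 then (cm.getD ab.1 PySem.Dict.empty).modify ab.2 0 (· + 1)
          else cm.getD k PySem.Dict.empty := by
      intro k; rw [hcm', PySem.Dict.getD_modify]
    have hrows' : ∀ k, k ∈ L → (cm'.getD k PySem.Dict.empty).keys = L := by
      intro k hk
      rw [hgetD' k]
      by_cases hka : k = ab.1
      · rw [if_pos hka, PySem.Dict.keys_modify,
            PySem.Dict.keys_insert_of_contains _ _ hc2, hrows ab.1 ha]
      · rw [if_neg hka]; exact hrows k hk
    have hmem' : ∀ pr, pr ∈ Z → pr.1 ∈ L ∧ pr.2 ∈ L :=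
      fun pr hpr => hmem pr (List.mem_cons_of_mem _ hpr)
    obtain ⟨ih1, ih2, ih3⟩ := ih cm' hkeys' hrows' hmem'
    refine ⟨by simpa [List.foldl_cons, hstep] using ih1,
            by simpa [List.foldl_cons, hstep] using ih2, ?_⟩
    intro t p
    have hfold : (ab :: Z).foldl (pvStepA L) cm = Z.foldl (pvStepA L) cm' := by
      rw [List.foldl_cons, hstep]
    rw [hfold, ih3 t p, hgetD' t]
    by_cases hta : t = ab.1
    · rw [if_pos hta, PySem.Dict.getD_modify]
      subst hta
      by_cases hpb : p = ab.2
      · subst hpb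
        have heq : ((ab.1, ab.2) : String × String) = ab := rfl
        rw [if_pos rfl, heq]
        simp
        ring
      · have hne : ¬ (((ab.1, p) : String × String) = ab) := by
          intro h; exact hpb (congrArg Prod.snd h)
        rw [if_neg hpb]
        have hne' : ¬ (ab = ((ab.1, p) : String × String)) := fun h => hne h.symm
        simp [hne']
    · rw [if_neg hta]
      have hne : ¬ (((t, p) : String × String) = ab) := by
        intro h; exact hta (congrArg Prod.fst h)
      have hne' : ¬ (ab = ((t, p) : String × String)) := fun h => hne h.symm
      simp [hne']

theorem pvCm0_items (L : List String) (hL : L.Nodup) :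
    (L.foldl (fun d label => d.insert label (pvZeroRow L)) PySem.Dict.empty).items
      = L.map (fun t => (t, pvZeroRow L)) := by
  rw [PySem.Dict.items_foldl_insert_fresh (k := fun t => t) (v := fun _ => pvZeroRow L)
    L PySem.Dict.empty (fun a _ => PySem.Dict.contains_empty a) (by simpa using hL)]
  rfl

theorem pvCm0_keys (L : List String) (hL : L.Nodup) :
    (L.foldl (fun d label => d.insert label (pvZeroRow L)) PySem.Dict.empty).keys = L := by
  simp [PySem.Dict.keys, pvCm0_items L hL, Function.comp_def]

theorem pvCm0_getD (L : List String) (hL : L.Nodup) (t : String) (ht : t ∈ L) :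
    (L.foldl (fun d label => d.insert label (pvZeroRow L)) PySem.Dict.empty).getD t
      PySem.Dict.empty = pvZeroRow L := by
  have hm : (t, pvZeroRow L) ∈
      (L.foldl (fun d label => d.insert label (pvZeroRow L)) PySem.Dict.empty).items := by
    rw [pvCm0_items L hL]; exact List.mem_map.mpr ⟨t, ht, rfl⟩
  have hn : (L.foldl (fun d label => d.insert label (pvZeroRow L)) PySem.Dict.empty).keys.Nodup := by
    rw [pvCm0_keys L hL]; exact hL
  exact PySem.Dict.getD_of_mem_items _ hm hn _

theorem pvEmptyItems : (PySem.Dict.empty : PySem.Dict String (PySem.Dict String Int)).items = [] := rfl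

-- B's inner dict comprehension, as items
theorem pvRowB_items (L : List String) (hL : L.Nodup) (preds : List String) :
    (L.foldl (fun r p => r.insert p (PySem.List.count preds p : Int)) PySem.Dict.empty).items
      = L.map (fun p => (p, (PySem.List.count preds p : Int))) := by
  rw [PySem.Dict.items_foldl_insert_fresh (k := fun p => p)
    (v := fun p => (PySem.List.count preds p : Int))
    L PySem.Dict.empty (fun a _ => PySem.Dict.contains_empty a) (by simpa using hL)]
  rfl

-- each of B's cells equals the count of the corresponding pair in the zipped data
theorem pvCountRow (t p : String) : ∀ Z : List (String × String),
    (pvRowPreds Z t).count p = Z.count (t, p) := by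
  intro Z
  induction Z with
  | nil => rfl
  | cons ab Z ih =>
    unfold pvRowPreds at ih ⊢
    rw [List.filter_cons]
    by_cases h1 : ab.1 = t
    · rw [if_pos (by simp [h1])]
      by_cases h2 : ab.2 = p
      · have : ab = (t, p) := Prod.ext h1 h2
        simp [this, List.count_cons, ih]
      · have : ab ≠ (t, p) := fun h => h2 (congrArg Prod.snd h)
        simp [List.count_cons, h2, this, ih]
    · rw [if_neg (by simp [h1])]
      have : ab ≠ (t, p) := fun h => h1 (congrArg Prod.fst h)
      simp [List.count_cons, this, ih]

-- ===== VERDICT (by name: the statement is the Claim_ definition above) =====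
theorem compute_multiclass_confusion_matrix_py_spec : Claim_equal_compute_multiclass_confusion_matrix_py := by
  intro y_true y_pred _
  unfold Spec_compute_multiclass_confusion_matrix_py
  simp only [compute_multiclass_confusion_matrix_py, compute_multiclass_confusion_matrix_py_alt]
  set L := pvAllLabels y_true y_pred with hLdef
  have hL : L.Nodup := pvAllLabels_nodup y_true y_pred
  set Z := y_true.zip y_pred with hZdef
  set cm0 := L.foldl (fun d label => d.insert label (pvZeroRow L)) PySem.Dict.empty with hcm0
  have hmemZ : ∀ pr, pr ∈ Z → pr.1 ∈ L ∧ pr.2 ∈ L := by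
    intro pr hpr
    obtain ⟨h1, h2⟩ := List.of_mem_zip hpr
    exact ⟨(mem_pvAllLabels y_true y_pred pr.1).mpr (Or.inl h1),
           (mem_pvAllLabels y_true y_pred pr.2).mpr (Or.inr h2)⟩
  obtain ⟨hk, hr, hc⟩ := pvLoopA L hL Z cm0 (pvCm0_keys L hL)
    (fun k hk => by rw [pvCm0_getD L hL k hk]; exact pvZeroRow_keys L hL) hmemZ
  set cmF := Z.foldl (pvStepA L) cm0 with hcmF
  -- outer items on both sides reduce to maps over L
  rw [PySem.Dict.items_eq_map_keys cmF (by rw [hk]; exact hL) PySem.Dict.empty, hk,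
      PySem.Dict.items_foldl_insert_fresh (k := fun t => t)
        (v := fun t => L.foldl
          (fun r p => r.insert p (PySem.List.count (pvRowPreds Z t) p : Int)) PySem.Dict.empty)
        L PySem.Dict.empty (fun a _ => PySem.Dict.contains_empty a) (by simpa using hL),
      pvEmptyItems, List.nil_append, List.map_map, List.map_map]
  apply List.map_congr_left
  intro t htL
  simp only [Function.comp]
  refine Prod.ext rfl ?_
  rw [PySem.Dict.items_eq_map_keys (cmF.getD t PySem.Dict.empty)
        (by rw [hr t htL]; exact hL) 0, hr t htL,
      pvRowB_items L hL (pvRowPreds Z t)]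
  apply List.map_congr_left
  intro p _
  refine Prod.ext rfl ?_
  rw [hc t p, pvCm0_getD L hL t htL, pvZeroRow_getD L hL p, PySem.List.count_eq, pvCountRow t p Z]
  simp
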